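-- pv_equiv track=rewrite | github.com/THUDM/AgentTuning | AgentBench.old/src/agent.py | _calc_segments
-- ===== SOURCE A (Python) =====
-- def _calc_segments(msg: str):
--     segments = 0
--     current_segment = ""
--     inside_word = False
--
--     for char in msg:
--         if char.isalpha():
--             current_segment += char
--             if not inside_word:
--                 inside_word = True
--             if len(current_segment) >= 7:
--                 segments += 1
--                 current_segment = ""
--                 inside_word = False
--         else:
--             if inside_word:
--                 segments += 1
--                 current_segment = ""
--                 inside_word = False
--             if char not in [" ", "\n"]:
--                 segments += 1
--
--     if len(current_segment) > 0:
--         segments += 1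
--
--     return segments
-- ===== SOURCE B (Python) =====
-- from itertools import groupby
--
-- def _calc_segments(msg: str):
--     total = 0
--     for is_alpha, group in groupby(msg, key=str.isalpha):
--         run = list(group)
--         if is_alpha:
--             total += (len(run) + 6) // 7
--         else:
--             total += sum(1 for c in run if c not in (" ", "\n"))
--     return total
-- ===== Notes on version B (the rewrite author's own statement) =====
-- stated objective: simpler
-- what changed: Replaces the incremental current_segment/inside_word state machine with itertools.groupby run-grouping: each maximal alphabetic run of length L contributes ceil(L/7) = (L+6)//7 segments in closed form, and each non-alphabetic run contributes its count of characters that are neither space nor newline.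
import Mathlib
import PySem

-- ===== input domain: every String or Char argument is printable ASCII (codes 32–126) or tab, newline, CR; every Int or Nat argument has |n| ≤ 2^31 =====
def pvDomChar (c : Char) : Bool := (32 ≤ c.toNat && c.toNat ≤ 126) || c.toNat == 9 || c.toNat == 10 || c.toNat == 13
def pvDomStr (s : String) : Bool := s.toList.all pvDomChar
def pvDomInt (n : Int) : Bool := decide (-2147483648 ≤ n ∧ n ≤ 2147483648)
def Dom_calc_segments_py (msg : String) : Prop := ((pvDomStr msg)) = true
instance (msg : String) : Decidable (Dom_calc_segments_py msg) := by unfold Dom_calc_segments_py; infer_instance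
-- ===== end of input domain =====

-- B replaces A's incremental current_segment/inside_word state machine by grouping the string
-- into maximal alphabetic / non-alphabetic runs and adding a closed-form count per run (simpler).

-- ===== PORT A =====
-- state: (segments, current_segment, inside_word)
def calcLoopA (st : Int × List Char × Bool) (c : Char) : Int × List Char × Bool :=
  if PySem.Chars.isalpha c then
    let cur := st.2.1 ++ [c]
    if 7 ≤ cur.length then (st.1 + 1, [], false) else (st.1, cur, true)
  else
    let st' := if st.2.2 then (st.1 + 1, ([] : List Char), false) else st
    if ¬(c = ' ' ∨ c = '\n') then (st'.1 + 1, st'.2.1, st'.2.2) else st'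

def calc_segments_py (msg : String) : Int :=
  let st := msg.toList.foldl calcLoopA (0, [], false)
  if 0 < st.2.1.length then st.1 + 1 else st.1

-- ===== PORT B =====
-- groupby(msg, key=str.isalpha): peel one maximal run per step, add its closed-form count
def calcAltRec : List Char → Int
  | [] => 0
  | c :: cs =>
    if h : PySem.Chars.isalpha c = true then
      let run := (c :: cs).takeWhile (fun x => PySem.Chars.isalpha x)
      (((run.length + 6) / 7 : Nat) : Int)
        + calcAltRec ((c :: cs).dropWhile (fun x => PySem.Chars.isalpha x))
    else
      let run := (c :: cs).takeWhile (fun x => !PySem.Chars.isalpha x)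
      ((run.filter (fun x => !(x == ' ' || x == '\n'))).length : Int)
        + calcAltRec ((c :: cs).dropWhile (fun x => !PySem.Chars.isalpha x))
  termination_by cs => cs.length
  decreasing_by
  · simp [List.dropWhile, h]
    exact List.length_dropWhile_le _ _
  · simp [List.dropWhile, h]
    exact List.length_dropWhile_le _ _

def calc_segments_py_alt (msg : String) : Int := calcAltRec msg.toList

-- ===== PRECONDITION & SPEC =====
def Spec_calc_segments_py (msg : String) (out : Int) : Prop := out = calc_segments_py_alt msg
instance (msg : String) (out : Int) : Decidable (Spec_calc_segments_py msg out) := by unfold Spec_calc_segments_py; infer_instance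

-- ===== CLAIM (what is proved, stated in full; the proofs are below) =====
def Claim_equal_calc_segments_py : Prop := ∀ (msg : String), Dom_calc_segments_py msg → Spec_calc_segments_py msg (calc_segments_py msg)

-- ===== LEMMAS AND PROOFS =====

-- proof helper: A's remaining count given k (≤ 6) alphabetic chars already in the current segment
def pvPartial : Nat → List Char → Int
  | k, [] => if 0 < k then 1 else 0
  | k, c :: cs =>
    if PySem.Chars.isalpha c then
      if 7 ≤ k + 1 then 1 + pvPartial 0 cs else pvPartial (k + 1) cs
    else
      (if 0 < k then 1 else 0) + (if ¬(c = ' ' ∨ c = '\n') then 1 else 0) + pvPartial 0 cs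

theorem loop_eq (cs : List Char) : ∀ (segs : Int) (cur : List Char), cur.length ≤ 6 →
    (let st := cs.foldl calcLoopA (segs, cur, !cur.isEmpty)
     if 0 < st.2.1.length then st.1 + 1 else st.1) = segs + pvPartial cur.length cs := by
  induction cs with
  | nil =>
    intro segs cur _
    simp only [List.foldl_nil, pvPartial]
    by_cases h : 0 < cur.length <;> simp [h]
  | cons c cs ih =>
    intro segs cur hlen
    simp only [List.foldl_cons, pvPartial]
    by_cases ha : PySem.Chars.isalpha c = true
    · by_cases h7 : 7 ≤ cur.length + 1
      · have : calcLoopA (segs, cur, !cur.isEmpty) c = (segs + 1, [], false) := by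
          simp [calcLoopA, ha, h7]
        rw [this]
        have := ih (segs + 1) [] (by simp)
        simp only [List.isEmpty_nil, Bool.not_true] at this ⊢
        simp only [List.length_nil] at this
        rw [this]; simp [ha, h7]; ring
      · have : calcLoopA (segs, cur, !cur.isEmpty) c = (segs, cur ++ [c], true) := by
          simp [calcLoopA, ha, h7]
        rw [this]
        have hne : (cur ++ [c]).isEmpty = false := by simp
        have := ih segs (cur ++ [c]) (by simp; omega)
        rw [hne] at this
        simp only [Bool.not_false] at this
        rw [this]; simp [ha, h7]
    · -- non-alphabetic char: after this step the current segment is empty either way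
      have hstep : calcLoopA (segs, cur, !cur.isEmpty) c
          = (segs + (if 0 < cur.length then 1 else 0) + (if ¬(c = ' ' ∨ c = '\n') then 1 else 0),
             (if 0 < cur.length then ([] : List Char) else cur), false) := by
        by_cases hc : 0 < cur.length
        · have : cur.isEmpty = false := by
            cases cur <;> simp_all
          by_cases hsp : c = ' ' ∨ c = '\n' <;>
            simp [calcLoopA, ha, this, hc, hsp]
        · have hnil : cur = [] := by cases cur <;> simp_all
          subst hnil
          by_cases hsp : c = ' ' ∨ c = '\n' <;>
            simp [calcLoopA, ha, hsp]
      rw [hstep]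
      have hcur0 : (if 0 < cur.length then ([] : List Char) else cur) = [] := by
        by_cases hc : 0 < cur.length
        · simp [hc]
        · have : cur = [] := by cases cur <;> simp_all
          simp [this]
      rw [hcur0]
      have := ih (segs + (if 0 < cur.length then 1 else 0) + (if ¬(c = ' ' ∨ c = '\n') then 1 else 0)) [] (by simp)
      simp only [List.isEmpty_nil, Bool.not_true, List.length_nil] at this
      rw [this]; simp [ha]; ring

-- calcAltRec peels a (possibly empty) non-alphabetic prefix
theorem altRec_peel_na (cs : List Char) :
    calcAltRec cs = (((cs.takeWhile (fun x => !PySem.Chars.isalpha x)).filter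
        (fun x => !(x == ' ' || x == '\n'))).length : Int)
      + calcAltRec (cs.dropWhile (fun x => !PySem.Chars.isalpha x)) := by
  cases cs with
  | nil => simp [calcAltRec]
  | cons c cs' =>
    by_cases ha : PySem.Chars.isalpha c = true
    · have ht : (c :: cs').takeWhile (fun x => !PySem.Chars.isalpha x) = [] := by
        simp [List.takeWhile, ha]
      have hd : (c :: cs').dropWhile (fun x => !PySem.Chars.isalpha x) = c :: cs' := by
        simp [List.dropWhile, ha]
      rw [ht, hd]; simp
    · rw [calcAltRec]; simp [ha]

-- calcAltRec unfolds one non-alphabetic CHARACTER at a time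
theorem altRec_cons_nonalpha (c : Char) (cs : List Char) (h : PySem.Chars.isalpha c = false) :
    calcAltRec (c :: cs) = (if ¬(c = ' ' ∨ c = '\n') then 1 else 0) + calcAltRec cs := by
  rw [altRec_peel_na (c :: cs), altRec_peel_na cs]
  have ht : (c :: cs).takeWhile (fun x => !PySem.Chars.isalpha x)
      = c :: cs.takeWhile (fun x => !PySem.Chars.isalpha x) := by
    simp [List.takeWhile, h]
  have hd : (c :: cs).dropWhile (fun x => !PySem.Chars.isalpha x)
      = cs.dropWhile (fun x => !PySem.Chars.isalpha x) := by
    simp [List.dropWhile, h]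
  rw [ht, hd, List.filter_cons]
  by_cases hsp : c = ' ' ∨ c = '\n'
  · rcases hsp with h1 | h1 <;> subst h1 <;> simp
  · have h1 : c ≠ ' ' := fun hh => hsp (Or.inl hh)
    have h2 : c ≠ '\n' := fun hh => hsp (Or.inr hh)
    simp [h1, h2]
    ring

-- calcAltRec peels a (possibly empty) alphabetic prefix in closed form
theorem altRec_peel (cs : List Char) :
    calcAltRec cs = ((((cs.takeWhile (fun x => PySem.Chars.isalpha x)).length + 6) / 7 : Nat) : Int)
      + calcAltRec (cs.dropWhile (fun x => PySem.Chars.isalpha x)) := by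
  cases cs with
  | nil => simp [calcAltRec]
  | cons c cs' =>
    by_cases ha : PySem.Chars.isalpha c = true
    · rw [calcAltRec]; simp [ha]
    · have ht : (c :: cs').takeWhile (fun x => PySem.Chars.isalpha x) = [] := by
        simp [List.takeWhile, ha]
      have hd : (c :: cs').dropWhile (fun x => PySem.Chars.isalpha x) = c :: cs' := by
        simp [List.dropWhile, ha]
      rw [ht, hd]; norm_num

theorem partial_eq (cs : List Char) : ∀ (k : Nat), k ≤ 6 →
    pvPartial k cs = (((k + (cs.takeWhile (fun x => PySem.Chars.isalpha x)).length + 6) / 7 : Nat) : Int)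
      + calcAltRec (cs.dropWhile (fun x => PySem.Chars.isalpha x)) := by
  induction cs with
  | nil =>
    intro k hk
    simp only [pvPartial, List.takeWhile_nil, List.dropWhile_nil, List.length_nil, calcAltRec]
    by_cases h : 0 < k
    · have : (k + 0 + 6) / 7 = 1 := by omega
      simp [h, this]
    · have hk0 : k = 0 := by omega
      simp [hk0]
  | cons c cs' ih =>
    intro k hk
    by_cases ha : PySem.Chars.isalpha c = true
    · have ht : (c :: cs').takeWhile (fun x => PySem.Chars.isalpha x)
          = c :: cs'.takeWhile (fun x => PySem.Chars.isalpha x) := by simp [List.takeWhile, ha]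
      have hd : (c :: cs').dropWhile (fun x => PySem.Chars.isalpha x)
          = cs'.dropWhile (fun x => PySem.Chars.isalpha x) := by simp [List.dropWhile, ha]
      rw [ht, hd]
      simp only [pvPartial, ha, if_true]
      by_cases h7 : 7 ≤ k + 1
      · have hk6 : k = 6 := by omega
        subst hk6
        simp only [h7, if_true]
        rw [ih 0 (by omega)]
        have harith : (6 + (cs'.takeWhile (fun x => PySem.Chars.isalpha x)).length.succ + 6) / 7
            = 1 + (0 + (cs'.takeWhile (fun x => PySem.Chars.isalpha x)).length + 6) / 7 := by
          omega
        push_cast [List.length_cons, harith]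
        ring
      · simp only [h7, if_false]
        rw [ih (k + 1) (by omega)]
        have harith : k + 1 + (cs'.takeWhile (fun x => PySem.Chars.isalpha x)).length + 6
            = k + ((cs'.takeWhile (fun x => PySem.Chars.isalpha x)).length + 1) + 6 := by omega
        simp [List.length_cons, harith]
    · have hafalse : PySem.Chars.isalpha c = false := by simpa using ha
      have ht : (c :: cs').takeWhile (fun x => PySem.Chars.isalpha x) = [] := by
        simp [List.takeWhile, ha]
      have hd : (c :: cs').dropWhile (fun x => PySem.Chars.isalpha x) = c :: cs' := by
        simp [List.dropWhile, ha]
      rw [ht, hd]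
      simp only [pvPartial, hafalse, Bool.false_eq_true, if_false]
      rw [altRec_cons_nonalpha c cs' hafalse, altRec_peel cs']
      have h0 := ih 0 (by omega)
      simp only [Nat.zero_add] at h0
      rw [h0]
      by_cases h : 0 < k
      · have h1 : (k + ([] : List Char).length + 6) / 7 = 1 := by simp; omega
        simp only [h, if_true, h1]
        push_cast
        ring
      · have hk0 : k = 0 := by omega
        subst hk0
        have h1 : (0 + ([] : List Char).length + 6) / 7 = 0 := by simp
        simp only [h, if_false] at *
        simp only [h1]
        push_cast
        ring

-- ===== VERDICT (by name: the statement is the Claim_ definition above) =====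
theorem calc_segments_py_spec : Claim_equal_calc_segments_py := by
  intro msg _
  unfold Spec_calc_segments_py calc_segments_py calc_segments_py_alt
  have hl := loop_eq msg.toList 0 [] (by simp)
  simp only [List.isEmpty_nil, Bool.not_true, List.length_nil] at hl
  simp only [hl]
  rw [partial_eq msg.toList 0 (by omega), altRec_peel msg.toList]
  simp
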